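-- pv_equiv track=rewrite | github.com/mortyc126-debug/SHA | ccs_v01.py | add_fixed_carry
-- ===== SOURCE A (Python) =====
-- MASK32 = 0xFFFFFFFF
--
-- def add_fixed_carry(a, b, carry_vec):
--     """Addition where carry is FIXED (not computed from a,b).
--     Result: a XOR b XOR (carry_vec << 1), truncated to 32 bits.
--     This is what addition looks like when carry is predetermined."""
--     # Real addition: sum[k] = a[k] XOR b[k] XOR carry[k-1]
--     # With fixed carry: same formula but carry doesn't propagate from inputs
--     result = 0
--     for k in range(32):
--         ak = (a >> k) & 1
--         bk = (b >> k) & 1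
--         ck_prev = (carry_vec >> (k-1)) & 1 if k > 0 else 0
--         result |= ((ak ^ bk ^ ck_prev) << k)
--     return result & MASK32
-- ===== SOURCE B (Python) =====
-- MASK32 = 0xFFFFFFFF
--
-- def add_fixed_carry(a, b, carry_vec):
--     """Same result as the bit loop: per-bit XOR with the carry shifted up one,
--     computed in a single full-width expression."""
--     return (a ^ b ^ (carry_vec << 1)) & MASK32
-- ===== Notes on version B (the rewrite author's own statement) =====
-- stated objective: simpler
-- what changed: Replaced the 32-iteration per-bit loop (extract bit k of a, b and bit k-1 of carry_vec, XOR, OR into an accumulator) with one full-width expression (a ^ b ^ (carry_vec << 1)) & MASK32.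
import Mathlib
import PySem

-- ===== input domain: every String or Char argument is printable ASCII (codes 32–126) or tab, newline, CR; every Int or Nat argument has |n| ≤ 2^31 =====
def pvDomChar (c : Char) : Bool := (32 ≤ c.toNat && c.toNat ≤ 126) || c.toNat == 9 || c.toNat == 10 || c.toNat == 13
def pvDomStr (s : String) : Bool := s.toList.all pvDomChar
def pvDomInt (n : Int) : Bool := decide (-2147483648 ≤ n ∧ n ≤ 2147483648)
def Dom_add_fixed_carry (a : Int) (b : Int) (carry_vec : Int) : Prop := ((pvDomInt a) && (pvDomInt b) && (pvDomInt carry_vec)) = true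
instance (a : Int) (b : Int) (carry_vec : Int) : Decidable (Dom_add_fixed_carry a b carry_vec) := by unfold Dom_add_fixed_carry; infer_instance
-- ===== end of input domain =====

-- B replaces A's 32-iteration per-bit loop by the single full-width expression
-- (a ^ b ^ (carry_vec << 1)) & MASK32 (objective: simpler); proved to return the same value on all inputs.

-- ===== PORT A =====
def MASK32 : Int := 4294967295

def add_fixed_carry (a : Int) (b : Int) (carry_vec : Int) : Int :=
  let result :=
    (PySem.List.pyRange 0 32 1).foldl (fun (result : Int) (k : Int) =>
      let ak := PySem.Int.band (a >>> k.toNat) 1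
      let bk := PySem.Int.band (b >>> k.toNat) 1
      let ck_prev := if k > 0 then PySem.Int.band (carry_vec >>> (k - 1).toNat) 1 else 0
      PySem.Int.bor result (PySem.Int.bxor (PySem.Int.bxor ak bk) ck_prev <<< k.toNat)) 0
  PySem.Int.band result MASK32

-- ===== PORT B =====
def add_fixed_carry_alt (a : Int) (b : Int) (carry_vec : Int) : Int :=
  PySem.Int.band (PySem.Int.bxor (PySem.Int.bxor a b) (carry_vec <<< (1 : Nat))) MASK32

-- ===== PRECONDITION & SPEC =====
def Spec_add_fixed_carry (a : Int) (b : Int) (carry_vec : Int) (out : Int) : Prop := out = add_fixed_carry_alt a b carry_vec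
instance (a : Int) (b : Int) (carry_vec : Int) (out : Int) : Decidable (Spec_add_fixed_carry a b carry_vec out) := by unfold Spec_add_fixed_carry; infer_instance

-- ===== CLAIM (what is proved, stated in full; the proofs are below) =====
def Claim_equal_add_fixed_carry : Prop := ∀ (a : Int) (b : Int) (carry_vec : Int), Dom_add_fixed_carry a b carry_vec → Spec_add_fixed_carry a b carry_vec (add_fixed_carry a b carry_vec)

-- ===== LEMMAS AND PROOFS =====

-- pvTb x k is Python's (x >> k) & 1: the k-th two's-complement bit of x as an Int.
def pvTb (x : Int) (k : Nat) : Int := (x >>> k) % 2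

theorem pvTb_eq_testBit (x : Int) (k : Nat) : pvTb x k = if x.testBit k then 1 else 0 := by
  rcases x with m | m
  · have h1 : (Int.ofNat m) >>> k = Int.ofNat (m >>> k) := rfl
    rw [pvTb, h1]
    simp only [Int.testBit, Nat.testBit_eq_decide_div_mod_eq, Nat.shiftRight_eq_div_pow,
      Int.ofNat_eq_natCast]
    split <;> rename_i h <;> simp at h <;> omega
  · have h1 : (Int.negSucc m) >>> k = Int.negSucc (m >>> k) := rfl
    rw [pvTb, h1]
    simp only [Int.testBit, Nat.testBit_eq_decide_div_mod_eq, Nat.shiftRight_eq_div_pow,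
      Int.negSucc_eq]
    split <;> rename_i h <;> simp at h <;> omega

theorem pvBand_one_shift (x : Int) (j : Nat) : PySem.Int.band (x >>> j) 1 = pvTb x j := by
  rw [PySem.Int.band_one, PySem.Int.mod_eq_emod_of_pos (by norm_num)]; rfl

theorem pvBxor_ite (p q : Bool) :
    PySem.Int.bxor (if p then 1 else 0) (if q then 1 else 0) = if xor p q then 1 else 0 := by
  cases p <;> cases q <;> decide

theorem pvBxor_eq_xor (x y : Int) : PySem.Int.bxor x y = Int.xor x y := by
  rcases x with m | m <;> rcases y with n | n <;>
    simp [PySem.Int.bxor, Int.xor, Int.negSucc_eq] <;> (try (split_ifs <;> omega))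

theorem pvTb_shl_zero (c : Int) : pvTb (c <<< (1 : Nat)) 0 = 0 := by
  rw [pvTb, Int.shiftRight_eq_div_pow, Int.shiftLeft_eq]
  norm_num

theorem pvTb_shl_succ (c : Int) (j : Nat) : pvTb (c <<< (1 : Nat)) (j + 1) = pvTb c j := by
  rw [pvTb, pvTb, Int.shiftLeft_eq, Int.shiftRight_eq_div_pow, Int.shiftRight_eq_div_pow]
  have h1 : ((2 ^ (j+1) : Nat) : Int) = 2 * 2 ^ j := by push_cast; ring
  have h2 : c * 2 ^ 1 = 2 * c := by ring
  rw [h1, h2, Int.mul_ediv_mul_of_pos _ _ (by norm_num)]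
  norm_cast

theorem pvTerm (a b c : Int) (j : Nat) :
    PySem.Int.bxor (PySem.Int.bxor (PySem.Int.band (a >>> j) 1) (PySem.Int.band (b >>> j) 1))
      (if (j : Int) > 0 then PySem.Int.band (c >>> ((j : Int) - 1).toNat) 1 else 0) =
    pvTb (Int.xor (Int.xor a b) (c <<< (1 : Nat))) j := by
  have hthird : (if (j : Int) > 0 then PySem.Int.band (c >>> ((j : Int) - 1).toNat) 1 else 0)
      = pvTb (c <<< (1 : Nat)) j := by
    cases j with
    | zero => simp [pvTb_shl_zero]
    | succ m =>
      rw [if_pos (by positivity)]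
      have : (((m + 1 : Nat) : Int) - 1).toNat = m := by omega
      rw [this, pvBand_one_shift, pvTb_shl_succ]
  rw [hthird, pvBand_one_shift, pvBand_one_shift, pvTb_eq_testBit a j, pvTb_eq_testBit b j,
    pvTb_eq_testBit (c <<< (1 : Nat)) j, pvBxor_ite, pvBxor_ite,
    pvTb_eq_testBit, Int.testBit_lxor, Int.testBit_lxor]

theorem pvLorPow (n r : Nat) (h : r < 2 ^ n) : r ||| 2 ^ n = r + 2 ^ n := by
  induction n generalizing r with
  | zero => interval_cases r <;> decide
  | succ n ih =>
    have h2 : r / 2 < 2 ^ n := by omega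
    have key := ih (r / 2) h2
    have hbit : r = Nat.bit (r % 2 == 1) (r / 2) := by
      simp [Nat.bit]; rcases Nat.mod_two_eq_zero_or_one r with h0 | h0 <;> simp [h0] <;> omega
    have hpow : 2 ^ (n + 1) = Nat.bit false (2 ^ n) := by simp [Nat.bit]; ring
    rw [hbit, hpow, Nat.lor_bit, key]
    simp [Nat.bit]
    rcases Nat.mod_two_eq_zero_or_one r with h0 | h0 <;> simp [h0] <;> omega

theorem pvBorPow (r x : Int) (n : Nat) (hx : x = 0 ∨ x = 1) (h0 : 0 ≤ r) (h : r < 2 ^ n) :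
    PySem.Int.bor r (x <<< n) = r + x * 2 ^ n := by
  rcases hx with hx | hx <;> subst hx
  · have : (0 : Int) <<< n = 0 := by rw [Int.shiftLeft_eq]; ring
    simp [this]
  · have h1 : (1 : Int) <<< n = ((2 ^ n : Nat) : Int) := by rw [Int.shiftLeft_eq]; push_cast; ring
    rw [h1, PySem.Int.bor_of_nonneg h0 (by positivity)]
    have htn : ((2 ^ n : Nat) : Int).toNat = 2 ^ n := Int.toNat_natCast _
    have hrn : r.toNat < 2 ^ n := by
      have : ((2 ^ n : Nat) : Int) = 2 ^ n := by push_cast; ring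
      omega
    rw [htn, pvLorPow n r.toNat hrn]
    push_cast
    omega

theorem pvBandMask (x : Int) : PySem.Int.band x 4294967295 = x % 4294967296 := by
  have hm : (4294967295 : Nat) = 2 ^ 32 - 1 := by norm_num
  by_cases hx : 0 ≤ x
  · rw [PySem.Int.band]
    rw [if_pos hx, if_pos (by norm_num)]
    have : x.toNat &&& (4294967295 : Int).toNat = x.toNat % 2 ^ 32 := by
      have : (4294967295 : Int).toNat = 2 ^ 32 - 1 := by decide
      rw [this, Nat.and_two_pow_sub_one_eq_mod]
    rw [this]
    omega
  · rw [PySem.Int.band]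
    rw [if_neg hx, if_pos (by norm_num)]
    have h1 : (4294967295 : Int).toNat = 2 ^ 32 - 1 := by decide
    have h2 : (2 ^ 32 - 1 : Nat) &&& (-x - 1).toNat = (-x - 1).toNat % 2 ^ 32 := by
      rw [Nat.and_comm, Nat.and_two_pow_sub_one_eq_mod]
    rw [h1, h2]
    omega

theorem pvEmodPowSum (z : Int) (n : Nat) :
    z % ((2 : Int) ^ n) = ((List.range n).map (fun k => pvTb z k * 2 ^ k)).sum := by
  induction n with
  | zero => simp
  | succ n ih =>
    rw [List.range_succ, List.map_append, List.sum_append, ← ih]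
    simp only [List.map_cons, List.map_nil, List.sum_cons, List.sum_nil, add_zero]
    have hq : pvTb z n = z / 2 ^ n % 2 := by
      rw [pvTb, Int.shiftRight_eq_div_pow]; push_cast; ring_nf
    rw [hq]
    have hP : (0 : Int) < 2 ^ n := by positivity
    have e1 : z = z / 2 ^ n * 2 ^ n + z % 2 ^ n := by
      linarith [Int.ediv_add_emod z ((2 : Int) ^ n)]
    have e2 : z / 2 ^ n = 2 * (z / 2 ^ n / 2) + z / 2 ^ n % 2 := by omega
    have hr1 : 0 ≤ z % 2 ^ n := Int.emod_nonneg _ (by positivity)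
    have hr2 : z % 2 ^ n < 2 ^ n := Int.emod_lt_of_pos _ hP
    have hs1 : 0 ≤ z / 2 ^ n % 2 := by omega
    have hs2 : z / 2 ^ n % 2 ≤ 1 := by omega
    have key : z = (z % 2 ^ n + z / 2 ^ n % 2 * 2 ^ n) + (2 : Int) ^ (n + 1) * (z / 2 ^ n / 2) := by
      rw [pow_succ]
      linear_combination e1 + (2 : Int) ^ n * e2
    have hsp : z / 2 ^ n % 2 * 2 ^ n ≤ 2 ^ n := by nlinarith
    have hS1 : 0 ≤ z % 2 ^ n + z / 2 ^ n % 2 * 2 ^ n := by nlinarith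
    have hS2 : z % 2 ^ n + z / 2 ^ n % 2 * 2 ^ n < 2 ^ (n + 1) := by rw [pow_succ]; nlinarith
    conv_lhs => rw [key, Int.add_mul_emod_self_left]
    exact Int.emod_eq_of_lt hS1 hS2

theorem pvTb_two (z : Int) (k : Nat) : pvTb z k = 0 ∨ pvTb z k = 1 := Int.emod_two_eq _

theorem pvLoop (a b c : Int) (n : Nat) :
    ((List.range n).map (Nat.cast : Nat → Int)).foldl
      (fun (result : Int) (k : Int) =>
        let ak := PySem.Int.band (a >>> k.toNat) 1
        let bk := PySem.Int.band (b >>> k.toNat) 1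
        let ck_prev := if k > 0 then PySem.Int.band (c >>> (k - 1).toNat) 1 else 0
        PySem.Int.bor result (PySem.Int.bxor (PySem.Int.bxor ak bk) ck_prev <<< k.toNat)) 0
      = (Int.xor (Int.xor a b) (c <<< (1 : Nat))) % 2 ^ n := by
  induction n with
  | zero => simp
  | succ n ih =>
    rw [List.range_succ, List.map_append, List.foldl_append, ih]
    simp only [List.map_cons, List.map_nil, List.foldl_cons, List.foldl_nil]
    set z := Int.xor (Int.xor a b) (c <<< (1 : Nat)) with hzdef
    have hk : ((n : Int)).toNat = n := Int.toNat_natCast n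
    rw [hk]
    have hterm := pvTerm a b c n
    simp only [hterm]
    have h0 : 0 ≤ z % 2 ^ n := Int.emod_nonneg _ (by positivity)
    have h1 : z % 2 ^ n < 2 ^ n := Int.emod_lt_of_pos _ (by positivity)
    rw [pvBorPow _ _ _ (pvTb_two z n) h0 h1]
    rw [pvEmodPowSum z n, pvEmodPowSum z (n + 1), List.range_succ, List.map_append,
      List.sum_append]
    simp

theorem pvMain (a b c : Int) : add_fixed_carry a b c = add_fixed_carry_alt a b c := by
  have hr : PySem.List.pyRange 0 32 1 = (List.range 32).map (Nat.cast : Nat → Int) := by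
    rfl
  have hz := pvLoop a b c 32
  unfold add_fixed_carry add_fixed_carry_alt MASK32
  rw [hr, hz, pvBxor_eq_xor, pvBxor_eq_xor, pvBandMask, pvBandMask]
  have h32 : (4294967296 : Int) = 2 ^ 32 := by norm_num
  rw [h32, Int.emod_emod_of_dvd _ (dvd_refl _)]

-- ===== VERDICT (by name: the statement is the Claim_ definition above) =====
theorem add_fixed_carry_spec : Claim_equal_add_fixed_carry := by
  intro a b c _
  unfold Spec_add_fixed_carry
  exact pvMain a b c
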